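-- pv_equiv track=rewrite | github.com/JT-Mathew/JY-Music | powerpoint.py | checkLineCountB
-- ===== SOURCE A (Python) =====
-- def checkLineCountB(splitPara, count, limit):
--     check = 0
--     for line in splitPara:
--         if len(line) > limit:
--             if check == 0:
--                 count = count + 1
--                 check = 1
--             else:
--                 check = 0
--     return count
-- ===== SOURCE B (Python) =====
-- def checkLineCountB(splitPara, count, limit):
--     longLines = sum(1 for line in splitPara if len(line) > limit)
--     return count + (longLines + 1) // 2
-- ===== Notes on version B (the rewrite author's own statement) =====
-- stated objective: simpler
-- what changed: Replaces the stateful per-line toggle with a count of long lines followed by the closed-form adjustment count + (L+1)//2.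
import Mathlib
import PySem

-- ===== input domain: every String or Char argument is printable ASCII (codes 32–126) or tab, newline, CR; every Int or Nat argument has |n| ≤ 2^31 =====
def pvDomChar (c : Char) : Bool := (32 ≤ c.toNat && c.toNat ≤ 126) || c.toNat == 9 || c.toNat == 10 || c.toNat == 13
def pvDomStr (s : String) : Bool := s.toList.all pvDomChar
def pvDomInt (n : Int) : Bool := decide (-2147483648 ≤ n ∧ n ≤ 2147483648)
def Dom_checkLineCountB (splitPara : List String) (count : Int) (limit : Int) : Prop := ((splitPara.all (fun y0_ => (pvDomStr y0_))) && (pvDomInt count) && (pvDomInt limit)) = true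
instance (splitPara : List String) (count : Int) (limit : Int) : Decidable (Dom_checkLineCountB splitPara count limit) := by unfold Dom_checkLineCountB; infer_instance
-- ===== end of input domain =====

-- B replaces A's stateful per-line toggle by counting long lines and adding (L+1)//2 in closed form (objective: simpler).

-- ===== PORT A =====
def checkLineCountB (splitPara : List String) (count : Int) (limit : Int) : Int :=
  (splitPara.foldl
    (fun (st : Int × Int) line =>
      if (PySem.Str.len line : Int) > limit then
        if st.2 = 0 then (st.1 + 1, 1) else (st.1, 0)
      else st)
    (count, 0)).1

-- ===== PORT B =====
def checkLineCountB_alt (splitPara : List String) (count : Int) (limit : Int) : Int :=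
  let longLines : Int :=
    splitPara.foldl (fun acc line => if (PySem.Str.len line : Int) > limit then acc + 1 else acc) 0
  count + PySem.Int.floordiv (longLines + 1) 2

-- ===== PRECONDITION & SPEC =====
def Spec_checkLineCountB (splitPara : List String) (count : Int) (limit : Int) (out : Int) : Prop := out = checkLineCountB_alt splitPara count limit
instance (splitPara : List String) (count : Int) (limit : Int) (out : Int) : Decidable (Spec_checkLineCountB splitPara count limit out) := by unfold Spec_checkLineCountB; infer_instance

-- ===== CLAIM (what is proved, stated in full; the proofs are below) =====
def Claim_equal_checkLineCountB : Prop := ∀ (splitPara : List String) (count : Int) (limit : Int), Dom_checkLineCountB splitPara count limit → Spec_checkLineCountB splitPara count limit (checkLineCountB splitPara count limit)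

-- ===== LEMMAS AND PROOFS =====

-- B's counting foldl, starting from acc, adds the number of long lines.
theorem longCount_shift (splitPara : List String) (limit acc : Int) :
    splitPara.foldl (fun acc line => if (PySem.Str.len line : Int) > limit then acc + 1 else acc) acc
      = acc + splitPara.foldl (fun acc line => if (PySem.Str.len line : Int) > limit then acc + 1 else acc) 0 := by
  induction splitPara generalizing acc with
  | nil => simp
  | cons x xs ih =>
    simp only [List.foldl]
    rw [ih, ih (if (PySem.Str.len x : Int) > limit then (0:Int) + 1 else 0)]
    split <;> ring

-- A's toggle fold from state (count, check) with check ∈ {0,1}: result is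
-- count + (L + 1 - check) // 2 where L is the number of long lines.
theorem toggle_closed (splitPara : List String) (limit : Int) :
    ∀ (count check : Int), check = 0 ∨ check = 1 →
    (splitPara.foldl
      (fun (st : Int × Int) line =>
        if (PySem.Str.len line : Int) > limit then
          if st.2 = 0 then (st.1 + 1, 1) else (st.1, 0)
        else st)
      (count, check)).1
      = count + ((splitPara.foldl (fun acc line => if (PySem.Str.len line : Int) > limit then acc + 1 else acc) 0) + 1 - check) / 2 := by
  induction splitPara with
  | nil => intro count check hc; simp; omega
  | cons x xs ih =>
    intro count check hc
    simp only [List.foldl]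
    by_cases hx : (PySem.Str.len x : Int) > limit
    · simp only [if_pos hx]
      rw [longCount_shift xs limit ((0:Int)+1)]
      rcases hc with h0 | h1
      · subst h0
        rw [show (if (0:Int) = 0 then (count + 1, (1:Int)) else (count, 0)) = (count + 1, 1) from if_pos rfl]
        rw [ih (count + 1) 1 (Or.inr rfl)]
        omega
      · subst h1
        rw [show (if (1:Int) = 0 then (count + 1, (1:Int)) else (count, 0)) = (count, 0) from if_neg (by norm_num)]
        rw [ih count 0 (Or.inl rfl)]
        omega
    · simp only [if_neg hx]
      exact ih count check hc

-- ===== VERDICT (by name: the statement is the Claim_ definition above) =====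
theorem checkLineCountB_spec : Claim_equal_checkLineCountB := by
  intro splitPara count limit _
  unfold Spec_checkLineCountB checkLineCountB
  rw [toggle_closed splitPara limit count 0 (Or.inl rfl)]
  simp only [checkLineCountB_alt, PySem.Int.floordiv_eq_ediv_of_pos (by norm_num : (0:Int) < 2)]
  norm_num
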